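-- pv_equiv track=rewrite | github.com/cheykoff/thinkpython2e | 12-4-remove-letters.py | reduce_word
-- ===== SOURCE A (Python) =====
-- def reduce_word(word, d):
-- 	l = []
-- 	for key in d:
-- 		for i in range(len(word)):
-- 			word2 = word[0:i] + word[i+1:len(word)]
-- 			if word2 == key:
-- 				l.append(key)
-- 	return l
-- ===== SOURCE B (Python) =====
-- def reduce_word(word, d):
--     # Count every single-letter-deletion variant of word once, then one lookup per key.
--     cnt = {}
--     for i in range(len(word)):
--         v = word[:i] + word[i+1:]
--         cnt[v] = cnt.get(v, 0) + 1
--     out = []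
--     for key in d:
--         out += [key] * cnt.get(key, 0)
--     return out
-- ===== Notes on version B (the rewrite author's own statement) =====
-- stated objective: faster
-- what changed: B precomputes a dict counting all single-deletion variants of word once, then does one O(1) lookup per dictionary key instead of re-generating and comparing every variant for every key.
import Mathlib
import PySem

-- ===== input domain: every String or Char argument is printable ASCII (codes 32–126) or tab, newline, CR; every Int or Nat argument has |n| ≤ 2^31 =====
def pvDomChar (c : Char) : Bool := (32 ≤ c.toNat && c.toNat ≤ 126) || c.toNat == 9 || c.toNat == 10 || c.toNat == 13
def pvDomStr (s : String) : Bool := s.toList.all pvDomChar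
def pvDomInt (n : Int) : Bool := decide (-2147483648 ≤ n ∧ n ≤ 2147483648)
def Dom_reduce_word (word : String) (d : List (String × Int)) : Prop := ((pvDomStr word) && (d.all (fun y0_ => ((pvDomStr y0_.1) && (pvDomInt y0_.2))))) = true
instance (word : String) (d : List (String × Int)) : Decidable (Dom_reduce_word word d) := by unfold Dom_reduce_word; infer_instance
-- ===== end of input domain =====

-- B replaces A's per-key regeneration of all deletion variants by one precomputed
-- variant-count dict and a single lookup per key (objective: faster).

-- ===== PORT A =====
-- word[0:i] + word[i+1:len(word)], on the char-list side (PySem.Chars.slice = List slice)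
def pvDelA (w : List Char) (i : Int) : List Char :=
  PySem.List.slice w (some 0) (some i) ++ PySem.List.slice w (some (i + 1)) (some (w.length : Int))

def reduce_word (word : String) (d : List (String × Int)) : List String :=
  d.foldl (fun l kv =>
    (PySem.List.pyRange 0 (PySem.Str.len word) 1).foldl (fun l i =>
      if pvDelA word.toList i == kv.1.toList then l ++ [kv.1] else l) l) []

-- ===== PORT B =====
-- word[:i] + word[i+1:], B's own copy (char-list side)
def pvDelB (w : List Char) (i : Int) : List Char :=
  PySem.List.slice w none (some i) ++ PySem.List.slice w (some (i + 1)) none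

-- the count dict built by Source B's first loop: cnt[v] = cnt.get(v, 0) + 1
def pvCnt (word : String) : PySem.Dict (List Char) Int :=
  (PySem.List.pyRange 0 (PySem.Str.len word) 1).foldl
    (fun cnt i =>
      let v := pvDelB word.toList i
      cnt.insert v (cnt.getD v 0 + 1))
    PySem.Dict.empty

def reduce_word_alt (word : String) (d : List (String × Int)) : List String :=
  let cnt := pvCnt word
  d.foldl (fun out kv => out ++ PySem.List.pyRepeat [kv.1] (cnt.getD kv.1.toList 0)) []

-- ===== PRECONDITION & SPEC =====
def Spec_reduce_word (word : String) (d : List (String × Int)) (out : List String) : Prop := out = reduce_word_alt word d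
instance (word : String) (d : List (String × Int)) (out : List String) : Decidable (Spec_reduce_word word d out) := by unfold Spec_reduce_word; infer_instance

-- ===== CLAIM (what is proved, stated in full; the proofs are below) =====
def Claim_equal_reduce_word : Prop := ∀ (word : String) (d : List (String × Int)), Dom_reduce_word word d → Spec_reduce_word word d (reduce_word word d)

-- ===== LEMMAS AND PROOFS =====

-- the two variant expressions agree (word[0:i]+word[i+1:len] vs word[:i]+word[i+1:])
theorem pvDel_eq (w : List Char) (i : Int) : pvDelB w i = pvDelA w i := by
  simp [pvDelA, pvDelB, PySem.List.slice]

-- the count dict counts exactly the deletion variants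
theorem pvCnt_getD (word : String) (k : List Char) :
    (pvCnt word).getD k 0 =
      (((PySem.List.pyRange 0 (PySem.Str.len word) 1).map (pvDelA word.toList)).count k : Int) := by
  unfold pvCnt
  simp only [pvDel_eq]
  rw [← List.foldl_map (f := pvDelA word.toList)
      (g := fun (cnt : PySem.Dict (List Char) Int) v => cnt.insert v (cnt.getD v 0 + 1))]
  rw [PySem.Dict.getD_foldl_insert_add_one]
  simp [PySem.Dict.getD_empty]

-- A's inner loop over i appends kv.1 once per matching variant
theorem inner_eq (word : String) (k : String) (l : List String) :
    (PySem.List.pyRange 0 (PySem.Str.len word) 1).foldl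
        (fun l i => if pvDelA word.toList i == k.toList then l ++ [k] else l) l
      = l ++ PySem.List.pyRepeat [k] ((pvCnt word).getD k.toList 0) := by
  rw [PySem.List.foldl_append_if (f := fun _ => k)]
  rw [pvCnt_getD, PySem.List.pyRepeat_singleton]
  rw [List.map_const', ← List.countP_eq_length_filter]
  congr 1
  simp [List.count, List.countP_map, Function.comp_def]

-- ===== VERDICT (by name: the statement is the Claim_ definition above) =====
theorem reduce_word_spec : Claim_equal_reduce_word := by
  intro word d _
  unfold Spec_reduce_word reduce_word reduce_word_alt
  rw [List.foldl_ext (g := fun (out : List String) kv =>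
        out ++ PySem.List.pyRepeat [kv.1] ((pvCnt word).getD kv.1.toList 0))]
  intro l kv _
  exact inner_eq word kv.1 l
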